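-- pv_equiv track=rewrite | github.com/mjbommar/kernel-lore-mcp | src/kernel_lore_mcp/tools/sampling_tools.py | _aggregate_trailers
-- ===== SOURCE A (Python) =====
-- def _aggregate_trailers(thread_rows: list[dict]) -> dict[str, list[str]]:
--     out: dict[str, list[str]] = {}
--     for name in ("reviewed_by", "acked_by", "tested_by", "signed_off_by"):
--         seen: list[str] = []
--         for r in thread_rows:
--             for v in r.get(name) or []:
--                 if v not in seen:
--                     seen.append(v)
--         if seen:
--             out[name] = seen
--     return out
-- ===== SOURCE B (Python) =====
-- def _aggregate_trailers(thread_rows: list[dict]) -> dict[str, list[str]]: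
--     names = ("reviewed_by", "acked_by", "tested_by", "signed_off_by")
--     # single collection pass over the rows
--     collected: dict[str, list[str]] = {name: [] for name in names}
--     for r in thread_rows:
--         for name in names:
--             collected[name] += r.get(name) or []
--     # filter-based nub: take the head, drop all its later copies, repeat
--     out: dict[str, list[str]] = {}
--     for name in names:
--         result: list[str] = []
--         vals = collected[name]
--         while vals:
--             head = vals[0]
--             result.append(head)
--             vals = [v for v in vals[1:] if v != head]
--         if result:
--             out[name] = result
--     return out
-- ===== Notes on version B (the rewrite author's own statement) =====
-- stated objective: alternative
-- what changed: A makes four separate scans of thread_rows, each deduplicating on the fly with a seen-list membership test; B makes a single collection pass accumulating per-name lists in a dict and then deduplicates each list by a filter-based nub (repeatedly take the head and filter all its copies out of the remainder), with no seen container or membership-in-accumulator test at all.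
import Mathlib
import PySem

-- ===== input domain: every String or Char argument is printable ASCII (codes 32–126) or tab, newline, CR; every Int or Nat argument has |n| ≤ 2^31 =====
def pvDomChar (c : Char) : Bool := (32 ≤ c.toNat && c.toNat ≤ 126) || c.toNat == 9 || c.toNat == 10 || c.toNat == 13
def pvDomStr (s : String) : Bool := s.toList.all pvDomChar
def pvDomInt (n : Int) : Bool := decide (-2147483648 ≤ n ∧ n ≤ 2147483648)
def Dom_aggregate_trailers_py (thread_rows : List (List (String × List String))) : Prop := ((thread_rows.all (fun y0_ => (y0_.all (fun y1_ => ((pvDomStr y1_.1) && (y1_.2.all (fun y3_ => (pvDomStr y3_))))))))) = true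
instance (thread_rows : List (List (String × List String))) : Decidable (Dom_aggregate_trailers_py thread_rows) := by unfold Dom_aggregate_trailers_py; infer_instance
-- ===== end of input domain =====

-- B replaces A's four dedup-as-you-go scans of thread_rows by one collection pass into a dict plus a filter-based nub per name (alternative decomposition, same results).


-- ===== PORT A =====
-- Both Pythons read `r.get(name) or []`: first-match dict lookup, None/[] coerced to [].
def pvRowGet (r : List (String × List String)) (name : String) : List String :=
  ((PySem.Dict.mk r).get? name).getD []

def pvNames : List String := ["reviewed_by", "acked_by", "tested_by", "signed_off_by"]

def aggregate_trailers_py (thread_rows : List (List (String × List String))) : List (String × List String) :=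
  (pvNames.foldl (fun (out : PySem.Dict String (List String)) name =>
      let seen : List String :=
        thread_rows.foldl (fun seen r =>
          (pvRowGet r name).foldl (fun s v => if s.contains v then s else s ++ [v]) seen) []
      if seen ≠ [] then out.insert name seen else out) PySem.Dict.empty).items

-- ===== PORT B =====
-- B's while loop: pop the head into result, filter all its copies out of the remainder.
def pvNub (result : List String) : List String → List String
  | [] => result
  | head :: rest => pvNub (result ++ [head]) (rest.filter (fun v => v ≠ head))
termination_by vals => vals.length
decreasing_by simpa using le_trans (List.length_filter_le _ _) (Nat.le_of_eq rest.length_attach)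

def aggregate_trailers_py_alt (thread_rows : List (List (String × List String))) : List (String × List String) :=
  let collected : PySem.Dict String (List String) :=
    thread_rows.foldl (fun d r =>
        pvNames.foldl (fun d name => d.insert name (d.getD name [] ++ pvRowGet r name)) d)
      (pvNames.foldl (fun d name => d.insert name []) PySem.Dict.empty)
  (pvNames.foldl (fun (out : PySem.Dict String (List String)) name =>
      let result := pvNub [] (collected.getD name [])
      if result ≠ [] then out.insert name result else out) PySem.Dict.empty).items

-- ===== PRECONDITION & SPEC =====
def Spec_aggregate_trailers_py (thread_rows : List (List (String × List String))) (out : List (String × List String)) : Prop := out = aggregate_trailers_py_alt thread_rows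
instance (thread_rows : List (List (String × List String))) (out : List (String × List String)) : Decidable (Spec_aggregate_trailers_py thread_rows out) := by unfold Spec_aggregate_trailers_py; infer_instance

-- ===== CLAIM (what is proved, stated in full; the proofs are below) =====
def Claim_equal_aggregate_trailers_py : Prop := ∀ (thread_rows : List (List (String × List String))), Dom_aggregate_trailers_py thread_rows → Spec_aggregate_trailers_py thread_rows (aggregate_trailers_py thread_rows)

-- ===== LEMMAS AND PROOFS =====

-- The inner per-row pass of B updates each of the four names once.
theorem pv_inner_getD (d : PySem.Dict String (List String)) (g : String → List String)
    (name : String) (h : name ∈ pvNames) :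
    (pvNames.foldl (fun d n => d.insert n (d.getD n [] ++ g n)) d).getD name [] =
      d.getD name [] ++ g name := by
  fin_cases h <;> simp [pvNames, List.foldl, PySem.Dict.getD_insert]

-- B's collected value at a trailer name is the concatenation of that name's per-row lists.
theorem pv_collected_getD (rows : List (List (String × List String)))
    (d : PySem.Dict String (List String)) (name : String) (h : name ∈ pvNames) :
    (rows.foldl (fun d r =>
        pvNames.foldl (fun d n => d.insert n (d.getD n [] ++ pvRowGet r n)) d) d).getD name [] =
      d.getD name [] ++ rows.flatMap (fun r => pvRowGet r name) := by
  induction rows generalizing d with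
  | nil => simp
  | cons r rows ih =>
      simp only [List.foldl_cons, List.flatMap_cons]
      rw [ih _, pv_inner_getD _ _ _ h, List.append_assoc]

-- A's nested seen-loop over rows is the seen-fold over the concatenation.
theorem pv_seen_eq (rows : List (List (String × List String))) (name : String)
    (s : List String) :
    rows.foldl (fun seen r =>
        (pvRowGet r name).foldl (fun s v => if s.contains v then s else s ++ [v]) seen) s =
      (rows.flatMap (fun r => pvRowGet r name)).foldl
        (fun s v => if s.contains v then s else s ++ [v]) s := by
  induction rows generalizing s with
  | nil => simp
  | cons r rows ih =>
      simp only [List.foldl_cons, List.flatMap_cons, List.foldl_append]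
      exact ih _

-- pvNub with an accumulator prepends the accumulator.
theorem pv_nub_acc_aux (n : Nat) : ∀ (acc xs : List String), xs.length ≤ n →
    pvNub acc xs = acc ++ pvNub [] xs := by
  induction n with
  | zero =>
      intro acc xs h
      have hx : xs = [] := List.eq_nil_of_length_eq_zero (Nat.le_zero.mp h)
      subst hx; simp [pvNub]
  | succ n ih =>
      intro acc xs h
      match xs with
      | [] => simp [pvNub]
      | head :: rest =>
          have hlen : (rest.filter (fun v => v ≠ head)).length ≤ n := by
            have := List.length_filter_le (fun v => decide (v ≠ head)) rest
            simp only [List.length_cons, Nat.succ_le_succ_iff] at h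
            omega
          rw [pvNub, pvNub, ih _ _ hlen]
          simp only [List.nil_append]
          rw [ih [head] _ hlen]
          simp

theorem pv_nub_acc (acc xs : List String) : pvNub acc xs = acc ++ pvNub [] xs :=
  pv_nub_acc_aux xs.length acc xs le_rfl

-- A's seen-fold equals B's filter-based nub of the not-yet-seen elements.
theorem pv_seen_nub (xs : List String) (s : List String) :
    xs.foldl (fun s v => if s.contains v then s else s ++ [v]) s =
      s ++ pvNub [] (xs.filter (fun v => !s.contains v)) := by
  induction xs generalizing s with
  | nil => simp [pvNub]
  | cons x xs ih =>
      simp only [List.foldl_cons, List.filter_cons]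
      by_cases hx : s.contains x
      · rw [if_pos hx]
        have hb : (!s.contains x) = false := by simpa using hx
        rw [hb, if_neg (by simp)]
        exact ih s
      · have hxb : (!s.contains x) = true := by simpa using hx
        have hfil : (xs.filter (fun v => !s.contains v)).filter (fun v => v ≠ x) =
            xs.filter (fun v => !(s ++ [x]).contains v) := by
          rw [List.filter_filter]
          apply List.filter_congr
          intro v _
          by_cases hv : v = x <;> by_cases hs : s.contains v <;>
            simp [hv, hs]
        rw [if_neg hx, hxb, if_pos rfl, ih (s ++ [x]), pvNub]
        simp only [List.nil_append]
        rw [pv_nub_acc [x], hfil]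
        simp

-- ===== VERDICT (by name: the statement is the Claim_ definition above) =====
theorem aggregate_trailers_py_spec : Claim_equal_aggregate_trailers_py := by
  intro rows _
  unfold Spec_aggregate_trailers_py aggregate_trailers_py aggregate_trailers_py_alt
  have hc : ∀ name ∈ pvNames,
      ((rows.foldl (fun d r =>
          pvNames.foldl (fun d n => d.insert n (d.getD n [] ++ pvRowGet r n)) d)
        (pvNames.foldl (fun d n => d.insert n []) PySem.Dict.empty)).getD name []) =
        rows.flatMap (fun r => pvRowGet r name) := by
    intro name h
    rw [pv_collected_getD _ _ _ h]
    fin_cases h <;> simp [pvNames, PySem.Dict.getD_insert]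
  have hs : ∀ name, (rows.foldl (fun seen r =>
        (pvRowGet r name).foldl (fun s v => if s.contains v then s else s ++ [v]) seen) []) =
      pvNub [] (rows.flatMap (fun r => pvRowGet r name)) := by
    intro name
    rw [pv_seen_eq, pv_seen_nub]
    simp
  simp only [pvNames, List.foldl] at hc ⊢
  rw [hs, hs, hs, hs,
      hc "reviewed_by" (by decide), hc "acked_by" (by decide),
      hc "tested_by" (by decide), hc "signed_off_by" (by decide)]
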